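-- pv_equiv track=rewrite | github.com/JovanaGolijanin/Python | Projekat1/pokusavaj.py | current_player
-- ===== SOURCE A (Python) =====
-- from typing import List, Tuple
--
-- def current_player(state: List[List[str]]) -> str:
--     # Count the number of X's and O's on the board
--     x_count = sum(cell == "X" for row in state for cell in row)
--     o_count = sum(cell == "O" for row in state for cell in row)
--     # If the number of X's and O's is the same, it is X's turn
--     if x_count == o_count:
--         return "X"
--     # If the number of X's is one more than the number of O's, it is O's turn
--     elif x_count == o_count + 1:
--         return "O"
--     # If the number of X's and O's is not consistent, the game is over
--     else:
--         raise ValueError("Invalid game state")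
-- ===== SOURCE B (Python) =====
-- def current_player(state):
--     # Pair-cancellation: collect the marks, then repeatedly cancel one X
--     # against one O; whatever survives the matching decides the turn.
--     marks = [c for row in state for c in row if c == "X" or c == "O"]
--     while "X" in marks and "O" in marks:
--         marks.remove("X")
--         marks.remove("O")
--     if not marks:
--         return "X"
--     if marks == ["X"]:
--         return "O"
--     raise ValueError("Invalid game state")
-- ===== Notes on version B (the rewrite author's own statement) =====
-- stated objective: alternative
-- what changed: Instead of counting X's and O's and comparing the counts, B collects the marks and runs a pair-cancellation matching (repeatedly removing one X together with one O) and decides from the surviving residue: empty means X's turn, a single leftover X means O's turn, anything else is invalid.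
import Mathlib
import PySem

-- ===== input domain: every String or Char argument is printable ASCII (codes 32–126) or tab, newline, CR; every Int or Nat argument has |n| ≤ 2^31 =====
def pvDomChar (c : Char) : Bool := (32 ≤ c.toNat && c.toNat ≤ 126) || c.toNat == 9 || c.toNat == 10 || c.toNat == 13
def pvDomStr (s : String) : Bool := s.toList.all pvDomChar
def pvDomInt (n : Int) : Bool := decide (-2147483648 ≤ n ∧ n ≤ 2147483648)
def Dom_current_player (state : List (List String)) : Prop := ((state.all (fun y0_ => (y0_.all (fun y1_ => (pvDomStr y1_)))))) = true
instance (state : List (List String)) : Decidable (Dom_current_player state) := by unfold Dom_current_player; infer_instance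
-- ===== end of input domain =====

-- B replaces A's count-and-compare by pair-cancellation matching over the collected marks (alternative decomposition, not faster).


-- ===== PORT A =====
-- x_count / o_count: sum of booleans over the flattened board, as in A's two generator sums.
def current_player (state : List (List String)) : String :=
  let x_count : Int := (state.flatMap (fun row => row.map (fun cell => if cell = "X" then (1:Int) else 0))).sum
  let o_count : Int := (state.flatMap (fun row => row.map (fun cell => if cell = "O" then (1:Int) else 0))).sum
  if x_count = o_count then "X"
  else if x_count = o_count + 1 then "O"
  else ""  -- Python raises ValueError here; excluded by Pre_current_player

-- ===== PORT B =====
-- B's while loop: cancel one "X" against one "O" (first occurrences, as Python list.remove)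
-- as long as both are present; the guard guarantees remove never raises.
def cancelPairs (marks : List String) : List String :=
  if h : "X" ∈ marks ∧ "O" ∈ marks then
    cancelPairs ((marks.erase "X").erase "O")
  else marks
termination_by marks.length
decreasing_by
  calc ((marks.erase "X").erase "O").length ≤ (marks.erase "X").length := List.length_erase_le
    _ < marks.length := by rw [List.length_erase_of_mem h.1]; exact Nat.sub_lt (List.length_pos_of_mem h.1) one_pos

def current_player_alt (state : List (List String)) : String :=
  let marks := state.flatMap (fun row => row.filter (fun c => c == "X" || c == "O"))
  let r := cancelPairs marks
  if r = [] then "X"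
  else if r = ["X"] then "O"
  else ""  -- Python raises ValueError here; excluded by Pre_current_player

-- ===== PRECONDITION & SPEC =====
-- Pre_ excludes exactly the boards where the X count is neither equal to nor one more than
-- the O count: there A (and B) raise ValueError("Invalid game state").
def Pre_current_player (state : List (List String)) : Prop :=
  let x := (state.flatMap id).countP (fun c => c == "X")
  let o := (state.flatMap id).countP (fun c => c == "O")
  x = o ∨ x = o + 1
instance (state : List (List String)) : Decidable (Pre_current_player state) := by
  unfold Pre_current_player; infer_instance

def pvWitness_current_player : List (List String) :=
  [["X", "O", ""], ["", "X", ""], ["", "", ""]]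

def Spec_current_player (state : List (List String)) (out : String) : Prop := out = current_player_alt state
instance (state : List (List String)) (out : String) : Decidable (Spec_current_player state out) := by unfold Spec_current_player; infer_instance

-- ===== CLAIM (what is proved, stated in full; the proofs are below) =====
def Claim_equal_current_player : Prop := ∀ (state : List (List String)), Dom_current_player state → Pre_current_player state → Spec_current_player state (current_player state)

-- ===== LEMMAS AND PROOFS =====

-- cancelPairs subtracts min(#X,#O) from both counts.
theorem cancelPairs_count (marks : List String) :
    (cancelPairs marks).count "X" = marks.count "X" - min (marks.count "X") (marks.count "O") ∧
    (cancelPairs marks).count "O" = marks.count "O" - min (marks.count "X") (marks.count "O") := by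
  fun_induction cancelPairs marks with
  | case1 marks h ih =>
    obtain ⟨hx, ho⟩ := h
    have hx1 : (0:Nat) < marks.count "X" := List.count_pos_iff.mpr hx
    have ho1 : (0:Nat) < marks.count "O" := List.count_pos_iff.mpr ho
    have ex : (marks.erase "X").count "X" = marks.count "X" - 1 := by
      simp [List.count_erase_self]
    have exo : (marks.erase "X").count "O" = marks.count "O" := by
      simp [List.count_erase_of_ne (by decide : ("O":String) ≠ "X")]
    have eo : ((marks.erase "X").erase "O").count "O" = marks.count "O" - 1 := by
      simp [List.count_erase_self, exo]
    have eox : ((marks.erase "X").erase "O").count "X" = marks.count "X" - 1 := by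
      simp [List.count_erase_of_ne (by decide : ("X":String) ≠ "O"), ex]
    rw [eox, eo] at ih
    constructor <;> [rw [ih.1]; rw [ih.2]] <;> omega
  | case2 marks h =>
    rw [Decidable.not_and_iff_not_or_not] at h
    rcases h with h | h <;>
      simp [List.count_eq_zero_of_not_mem h]

-- elements of cancelPairs marks come from marks.
theorem cancelPairs_mem (marks : List String) (a : String) (ha : a ∈ cancelPairs marks) : a ∈ marks := by
  fun_induction cancelPairs marks with
  | case1 marks h ih =>
    exact List.mem_of_mem_erase (List.mem_of_mem_erase (ih ha))
  | case2 marks h => exact ha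

-- a list of X's and O's has length #X + #O.
theorem length_eq_counts (l : List String) (h : ∀ a ∈ l, a = "X" ∨ a = "O") :
    l.length = l.count "X" + l.count "O" := by
  induction l with
  | nil => simp
  | cons b bs ih =>
    have hb := h b (by simp)
    have := ih (fun a ha => h a (by simp [ha]))
    rcases hb with hb | hb <;>
      simp [hb, this] <;> omega

-- A's generator sum equals the countP over the flattened board.
theorem sum_flat (state : List (List String)) (p : String → Bool) :
    (state.flatMap (fun row => row.map (fun cell => if p cell then (1:Int) else 0))).sum
      = ((state.flatMap id).countP p : Int) := by
  induction state with
  | nil => simp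
  | cons r rs ih =>
    simp only [List.flatMap_cons, List.sum_append, List.countP_append, ih, id,
      PySem.List.sum_map_ite_one_zero]
    push_cast; ring

-- B's marks list is the filtered flattened board.
theorem marks_eq (state : List (List String)) :
    state.flatMap (fun row => row.filter (fun c => c == "X" || c == "O"))
      = (state.flatMap id).filter (fun c => c == "X" || c == "O") := by
  induction state with
  | nil => simp
  | cons r rs ih => simp [List.flatMap_cons, List.filter_append, ih]

-- ===== VERDICT (by name: the statement is the Claim_ definition above) =====
theorem current_player_spec : Claim_equal_current_player := by
  intro state _ hpre
  unfold Spec_current_player current_player current_player_alt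
  have hx := sum_flat state (fun c => c == "X")
  have ho := sum_flat state (fun c => c == "O")
  simp only [show (fun (cell : String) => if cell = "X" then (1:Int) else 0)
      = (fun cell => if (fun c => c == "X") cell then (1:Int) else 0) by funext c; simp,
    show (fun (cell : String) => if cell = "O" then (1:Int) else 0)
      = (fun cell => if (fun c => c == "O") cell then (1:Int) else 0) by funext c; simp] at *
  rw [hx, ho, marks_eq]
  unfold Pre_current_player at hpre
  set flat := state.flatMap id with hflat
  set marks := flat.filter (fun c => c == "X" || c == "O") with hmarks
  have hmx : marks.count "X" = flat.countP (fun c => c == "X") := by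
    rw [hmarks, List.count_filter (by decide)]
    simp [List.count_eq_countP]
  have hmo : marks.count "O" = flat.countP (fun c => c == "O") := by
    rw [hmarks, List.count_filter (by decide)]
    simp [List.count_eq_countP]
  have hall : ∀ a ∈ cancelPairs marks, a = "X" ∨ a = "O" := by
    intro a ha
    have := List.mem_filter.mp (hmarks ▸ cancelPairs_mem marks a ha)
    have h2 := this.2
    simp only [Bool.or_eq_true, beq_iff_eq] at h2
    exact h2
  obtain ⟨hcx, hco⟩ := cancelPairs_count marks
  have hlen := length_eq_counts (cancelPairs marks) hall
  set X := flat.countP (fun c => c == "X") with hX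
  set O := flat.countP (fun c => c == "O") with hO
  rcases hpre with h | h
  · -- x = o: residue is empty, both return "X"
    have hnil : cancelPairs marks = [] := by
      apply List.length_eq_zero_iff.mp; omega
    rw [if_pos (by exact_mod_cast h), hnil, if_pos rfl]
  · -- x = o + 1: residue is ["X"], A returns "O", B returns "O"
    have hres : cancelPairs marks = ["X"] := by
      have hxr : (cancelPairs marks).count "X" = 1 := by omega
      have hor : (cancelPairs marks).count "O" = 0 := by omega
      have hl1 : (cancelPairs marks).length = 1 := by omega
      obtain ⟨a, ha⟩ := List.length_eq_one_iff.mp hl1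
      rcases hall a (ha ▸ by simp) with h' | h'
      · rw [ha, h']
      · rw [ha, h'] at hor; simp at hor
    have hc1 : (X : Int) = O + 1 := by exact_mod_cast h
    rw [if_neg (by omega), if_pos (by omega), hres]
    norm_num
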